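-- pv_equiv track=rewrite | github.com/ricbit/advent-of-code | 2019/raw/adv16-2.py | step
-- ===== SOURCE A (Python) =====
-- def step(data):
--   newdata = [0] * len(data)
--   newdata[0] = sum(data)
--   for i in range(1, len(data)):
--     newdata[i] = newdata[i - 1] - data[i - 1]
--   for i in range(len(data)):
--     newdata[i] = abs(newdata[i]) % 10
--   return newdata
-- ===== SOURCE B (Python) =====
-- def step(data):
--   newdata = [0] * len(data)
--   running = data[-1]
--   newdata[-1] = abs(running) % 10
--   for i in range(len(data) - 2, -1, -1):
--     running += data[i]
--     newdata[i] = abs(running) % 10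
--   return newdata
-- ===== Notes on version B (the rewrite author's own statement) =====
-- stated objective: alternative
-- what changed: Replaces A's three passes (total sum, forward prefix-subtraction pass, abs-mod pass) with a single right-to-left pass maintaining a running suffix sum.
import Mathlib
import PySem

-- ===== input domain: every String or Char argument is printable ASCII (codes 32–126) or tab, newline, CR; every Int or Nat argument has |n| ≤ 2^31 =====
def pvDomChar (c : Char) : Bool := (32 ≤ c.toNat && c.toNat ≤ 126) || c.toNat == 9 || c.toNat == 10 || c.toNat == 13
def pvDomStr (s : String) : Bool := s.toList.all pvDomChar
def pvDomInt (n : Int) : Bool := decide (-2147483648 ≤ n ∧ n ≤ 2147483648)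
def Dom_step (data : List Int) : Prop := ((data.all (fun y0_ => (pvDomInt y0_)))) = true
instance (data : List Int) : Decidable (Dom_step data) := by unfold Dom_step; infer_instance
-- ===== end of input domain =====

-- B folds A's three passes (total sum, forward prefix-subtraction pass, abs-mod pass)
-- into ONE right-to-left pass maintaining a running suffix sum.

-- ===== PORT A =====
def step (data : List Int) : List Int :=
  let n : Int := (data.length : Int)
  let newdata := List.replicate data.length (0 : Int)
  let newdata := PySem.List.pySetD newdata 0 data.sum
  let newdata := (PySem.List.pyRange 1 n 1).foldl
    (fun nd i =>
      PySem.List.pySetD nd i (PySem.List.pyGetD nd (i - 1) 0 - PySem.List.pyGetD data (i - 1) 0))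
    newdata
  let newdata := (PySem.List.pyRange 0 n 1).foldl
    (fun nd i => PySem.List.pySetD nd i (PySem.Int.mod |PySem.List.pyGetD nd i 0| 10))
    newdata
  newdata

-- ===== PORT B =====
def step_alt (data : List Int) : List Int :=
  let newdata := List.replicate data.length (0 : Int)
  let running := PySem.List.pyGetD data (-1) 0
  let newdata := PySem.List.pySetD newdata (-1) (PySem.Int.mod |running| 10)
  let p := (PySem.List.pyRange ((data.length : Int) - 2) (-1) (-1)).foldl
    (fun (st : Int × List Int) i =>
      let r := st.1 + PySem.List.pyGetD data i 0
      (r, PySem.List.pySetD st.2 i (PySem.Int.mod |r| 10)))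
    (running, newdata)
  p.2

-- ===== PRECONDITION & SPEC =====
-- Pre_ excludes only the empty list, on which A raises IndexError at its first assignment.
def Pre_step (data : List Int) : Prop := data ≠ []
instance (data : List Int) : Decidable (Pre_step data) := by unfold Pre_step; infer_instance
def pvWitness_step : List Int := [1, 2, 3]
def Spec_step (data : List Int) (out : List Int) : Prop := out = step_alt data
instance (data : List Int) (out : List Int) : Decidable (Spec_step data out) := by unfold Spec_step; infer_instance

-- ===== CLAIM (what is proved, stated in full; the proofs are below) =====
def Claim_equal_step : Prop := ∀ (data : List Int), Dom_step data → Pre_step data → Spec_step data (step data)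

-- ===== LEMMAS AND PROOFS =====

-- suffix sum starting at index j
def sfx (data : List Int) (j : Nat) : Int := (data.drop j).sum
-- the common target value at index j
def tgt (data : List Int) (j : Nat) : Int := PySem.Int.mod |sfx data j| 10
def target (data : List Int) : List Int := (List.range' 0 data.length).map (tgt data)

theorem sfx_succ (data : List Int) (j : Nat) (hj : j < data.length) :
    sfx data j = data[j] + sfx data (j + 1) := by
  unfold sfx
  rw [← List.getElem_cons_drop hj, List.sum_cons]

theorem pySetD_neg_one (xs : List Int) (v : Int) (h : xs ≠ []) :
    PySem.List.pySetD xs (-1) v = xs.set (xs.length - 1) v := by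
  have hl : 1 ≤ xs.length := List.length_pos_iff.mpr h
  simp only [PySem.List.pySetD, PySem.List.pySet?, PySem.List.pyIdx?]
  rw [if_neg (by omega), if_pos (by simp; omega)]
  simp

-- invariant of A's first loop: after processing range(1, k) the first k cells hold the
-- suffix sums and the rest are still 0
theorem loop1 (data : List Int) (k : Nat) (h1 : 1 ≤ k) (h2 : k ≤ data.length) :
    (PySem.List.pyRange 1 (k : Int) 1).foldl
      (fun nd i =>
        PySem.List.pySetD nd i (PySem.List.pyGetD nd (i - 1) 0 - PySem.List.pyGetD data (i - 1) 0))
      (PySem.List.pySetD (List.replicate data.length (0 : Int)) 0 data.sum)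
    = (List.range' 0 k).map (sfx data) ++ List.replicate (data.length - k) 0 := by
  induction k with
  | zero => omega
  | succ k ih =>
    rcases Nat.eq_zero_or_pos k with hk | hk
    · subst hk
      rw [show ((0 + 1 : Nat) : Int) = 1 by norm_num, PySem.List.pyRange_one_eq_nil le_rfl]
      cases data with
      | nil => simp at h2
      | cons a t =>
        simp [sfx, List.replicate_succ,
          show PySem.List.pySetD (0 :: List.replicate t.length (0:Int)) 0 (a + t.sum)
              = (0 :: List.replicate t.length (0:Int)).set 0 (a + t.sum) from
            PySem.List.pySetD_natCast _ 0 _]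
    · have h2' : k ≤ data.length := by omega
      rw [show ((k + 1 : Nat) : Int) = (k : Int) + 1 by push_cast; ring,
        PySem.List.pyRange_one_succ_right (by exact_mod_cast hk), List.foldl_append, ih hk h2']
      have e1 : (k : Int) - 1 = ((k - 1 : Nat) : Int) := by omega
      have hget1 : PySem.List.pyGetD
          ((List.range' 0 k).map (sfx data) ++ List.replicate (data.length - k) 0)
          ((k : Int) - 1) 0 = sfx data (k - 1) := by
        rw [e1, PySem.List.pyGetD_natCast, List.getD_append _ _ _ _ (by simp; omega),
          List.getD_eq_getElem _ 0 (by simp; omega), List.getElem_map, List.getElem_range']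
        norm_num
      have hget2 : PySem.List.pyGetD data ((k : Int) - 1) 0 = data[k - 1]'(by omega) := by
        rw [e1, PySem.List.pyGetD_natCast, List.getD_eq_getElem data 0 (by omega)]
      simp only [List.foldl_cons, List.foldl_nil, hget1, hget2]
      have hval : sfx data (k - 1) - data[k - 1]'(by omega) = sfx data k := by
        rw [sfx_succ data (k - 1) (by omega), show k - 1 + 1 = k by omega]; ring
      rw [hval, PySem.List.pySetD_natCast, List.set_append, if_neg (by simp)]
      have hrep : List.replicate (data.length - k) (0 : Int)
          = 0 :: List.replicate (data.length - (k + 1)) 0 := by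
        rw [show data.length - k = (data.length - (k + 1)) + 1 by omega, List.replicate_succ]
      rw [hrep]
      simp only [List.length_map, List.length_range', Nat.sub_self, List.set_cons_zero]
      rw [List.range'_concat]
      simp

-- invariant of A's second loop (stated for any start list): range(0, k) maps the first k
-- cells through abs-mod-10 and leaves the rest alone
theorem loop2 (xs : List Int) (k : Nat) (hk : k ≤ xs.length) :
    (PySem.List.pyRange 0 (k : Int) 1).foldl
      (fun nd i => PySem.List.pySetD nd i (PySem.Int.mod |PySem.List.pyGetD nd i 0| 10)) xs
    = (xs.take k).map (fun x => PySem.Int.mod |x| 10) ++ xs.drop k := by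
  induction k with
  | zero => simp [PySem.List.pyRange_one_eq_nil le_rfl]
  | succ k ih =>
    have hk' : k ≤ xs.length := by omega
    have hklt : k < xs.length := by omega
    rw [show ((k + 1 : Nat) : Int) = (k : Int) + 1 by push_cast; ring,
      PySem.List.pyRange_one_succ_right (by positivity), List.foldl_append, ih hk']
    have hpre : ((xs.take k).map (fun x => PySem.Int.mod |x| 10)).length = k := by
      simp; omega
    have hget : PySem.List.pyGetD
        ((xs.take k).map (fun x => PySem.Int.mod |x| 10) ++ xs.drop k) ((k : Nat) : Int) 0
        = xs[k]'hklt := by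
      rw [PySem.List.pyGetD_natCast, List.getD_eq_getElem _ 0 (by simp; omega),
        List.getElem_append_right (by omega)]
      simp only [List.getElem_drop]
      congr 1
      simp
      omega
    simp only [List.foldl_cons, List.foldl_nil, hget, PySem.List.pySetD_natCast]
    rw [List.set_append, if_neg (by omega), hpre, Nat.sub_self,
      ← List.getElem_cons_drop hklt, List.set_cons_zero,
      ← List.take_concat_get hklt, List.map_concat, List.concat_append]

-- invariant of B's single backward loop: with the suffix already final and
-- running = sfx j, the countdown from j-1 finishes the job
theorem loopB (data : List Int) (j : Nat) (hj : j ≤ data.length) :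
    ((PySem.List.pyRange ((j : Int) - 1) (-1) (-1)).foldl
      (fun (st : Int × List Int) i =>
        let r := st.1 + PySem.List.pyGetD data i 0
        (r, PySem.List.pySetD st.2 i (PySem.Int.mod |r| 10)))
      (sfx data j, List.replicate j 0 ++ (List.range' j (data.length - j)).map (tgt data))).2
    = target data := by
  induction j with
  | zero =>
    rw [show ((0 : Nat) : Int) - 1 = -1 by norm_num, PySem.List.pyRange_neg_one_eq_nil le_rfl]
    simp [target]
  | succ j ih =>
    have hj' : j ≤ data.length := by omega
    have hjlt : j < data.length := by omega
    rw [show ((j + 1 : Nat) : Int) - 1 = (j : Int) by push_cast; ring,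
      PySem.List.pyRange_neg_one_cons (by omega : (-1 : Int) < (j : Int)), List.foldl_cons]
    have hr : sfx data (j + 1) + PySem.List.pyGetD data ((j : Nat) : Int) 0 = sfx data j := by
      rw [PySem.List.pyGetD_natCast, List.getD_eq_getElem data 0 hjlt, sfx_succ data j hjlt]
      ring
    have hset :
        PySem.List.pySetD
          (List.replicate (j + 1) 0 ++ (List.range' (j + 1) (data.length - (j + 1))).map (tgt data))
          ((j : Nat) : Int) (PySem.Int.mod |sfx data j| 10)
        = List.replicate j 0 ++ (List.range' j (data.length - j)).map (tgt data) := by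
      rw [PySem.List.pySetD_natCast, List.replicate_succ', List.append_assoc, List.set_append,
        if_neg (by simp), List.length_replicate, Nat.sub_self]
      rw [show data.length - j = (data.length - (j + 1)) + 1 by omega, List.range'_succ]
      simp [tgt]
    simp only [hr]
    rw [hset] at *
    exact ih hj'

theorem step_eq_target (data : List Int) (h : data ≠ []) : step data = target data := by
  have hl : 1 ≤ data.length := List.length_pos_iff.mpr h
  unfold step
  dsimp only
  rw [loop1 data data.length hl le_rfl]
  simp only [Nat.sub_self, List.replicate_zero, List.append_nil]
  have hlen : ((List.range' 0 data.length).map (sfx data)).length = data.length := by simp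
  rw [show ((data.length : Nat) : Int)
      = (((List.range' 0 data.length).map (sfx data)).length : Int) by rw [hlen]]
  rw [loop2 _ _ le_rfl, List.take_of_length_le (by simp), List.drop_of_length_le (by simp),
    List.append_nil]
  simp [target, tgt, Function.comp]

theorem step_alt_eq_target (data : List Int) (h : data ≠ []) : step_alt data = target data := by
  have hl : 1 ≤ data.length := List.length_pos_iff.mpr h
  obtain ⟨m, hm⟩ : ∃ m, data.length = m + 1 := ⟨data.length - 1, by omega⟩
  have hrun : PySem.List.pyGetD data (-1) 0 = sfx data m := by
    rw [PySem.List.pyGetD_neg_one data 0 h, List.getLast_eq_getElem]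
    unfold sfx
    rw [← List.getElem_cons_drop (show m < data.length by omega)]
    simp [show m + 1 = data.length by omega, show data.length - 1 = m by omega]
  have hinit :
      PySem.List.pySetD (List.replicate data.length (0 : Int)) (-1)
        (PySem.Int.mod |sfx data m| 10)
      = List.replicate m 0 ++ (List.range' m (data.length - m)).map (tgt data) := by
    rw [pySetD_neg_one _ _ (by simp; omega), List.length_replicate, hm,
      show m + 1 - 1 = m by omega, List.replicate_succ', List.set_append, if_neg (by simp),
      List.length_replicate, Nat.sub_self, List.set_cons_zero,
      show m + 1 - m = 1 by omega, List.range'_one]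
    simp [tgt]
  unfold step_alt
  dsimp only
  rw [hrun, hinit, show (data.length : Int) - 2 = ((m : Nat) : Int) - 1 by omega]
  exact loopB data m (by omega)

-- ===== VERDICT (by name: the statement is the Claim_ definition above) =====
theorem step_spec : Claim_equal_step := by
  intro data _ hpre
  unfold Spec_step
  rw [step_eq_target data hpre, step_alt_eq_target data hpre]
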